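-- pv_equiv track=rewrite | github.com/andersonjso/nfr-finder-2 | main.py | __divide_comments_by_user_group
-- ===== SOURCE A (Python) =====
-- def __divide_comments_by_user_group(comments):
--     list_messages_core = []
--     list_messages_contributor = []
--     list_messages_newcomer = []
--
--     for comment in comments:
--         if comment["user_association"] == "MEMBER" or comment["user_association"] == "OWNER":
--             list_messages_core.append(comment)
--         elif comment["user_association"] == "CONTRIBUTOR" or comment["user_association"] == "COLLABORATOR":
--             list_messages_contributor.append(comment)
--         elif comment["user_association"] == "NONE" or comment["user_association"] == "FIRST_TIMER" \
--                 or comment["user_association"] == "FIRST_TIMER_CONTRIBUTOR":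
--             list_messages_newcomer.append(comment)
--
--     return list_messages_core, list_messages_contributor, list_messages_newcomer
-- ===== SOURCE B (Python) =====
-- def __divide_comments_by_user_group(comments):
--     core = {"MEMBER", "OWNER"}
--     contributor = {"CONTRIBUTOR", "COLLABORATOR"}
--     newcomer = {"NONE", "FIRST_TIMER", "FIRST_TIMER_CONTRIBUTOR"}
--     return ([c for c in comments if c["user_association"] in core],
--             [c for c in comments if c["user_association"] in contributor],
--             [c for c in comments if c["user_association"] in newcomer])
-- ===== Notes on version B (the rewrite author's own statement) =====
-- stated objective: idiomatic
-- what changed: Replaces the single interleaved if/elif partition loop by three independent list comprehensions, each filtering comments against its own set of user associations.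
import Mathlib
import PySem

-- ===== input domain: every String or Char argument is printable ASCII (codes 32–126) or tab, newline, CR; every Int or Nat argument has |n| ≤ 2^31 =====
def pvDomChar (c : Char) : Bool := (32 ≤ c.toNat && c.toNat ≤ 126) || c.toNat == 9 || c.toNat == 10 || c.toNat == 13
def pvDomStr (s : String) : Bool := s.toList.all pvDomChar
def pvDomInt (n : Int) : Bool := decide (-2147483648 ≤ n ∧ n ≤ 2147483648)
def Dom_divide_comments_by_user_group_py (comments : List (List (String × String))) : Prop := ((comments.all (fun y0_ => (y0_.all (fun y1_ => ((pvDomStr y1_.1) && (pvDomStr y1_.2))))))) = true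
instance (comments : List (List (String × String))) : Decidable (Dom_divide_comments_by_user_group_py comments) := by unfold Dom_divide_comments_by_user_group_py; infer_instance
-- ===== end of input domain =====

-- B rebuilds the same partition with three independent membership filters instead of A's single if/elif loop; equal on all inputs whose comments carry the "user_association" key.

-- ===== PORT A =====
-- comment["user_association"]: the comment dict's value at that key; Pre_ guarantees the key is present, so the default "" is never used inside Pre_.
def pvUA (comment : List (String × String)) : String :=
  (PySem.Dict.ofList comment).getD "user_association" ""

def divide_comments_by_user_group_py (comments : List (List (String × String))) : (List (List (String × String))) × (List (List (String × String))) × (List (List (String × String))) :=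
  let st := comments.foldl (fun (acc : (List (List (String × String))) × (List (List (String × String))) × (List (List (String × String)))) comment =>
    if pvUA comment = "MEMBER" ∨ pvUA comment = "OWNER" then
      (acc.1 ++ [comment], acc.2.1, acc.2.2)
    else if pvUA comment = "CONTRIBUTOR" ∨ pvUA comment = "COLLABORATOR" then
      (acc.1, acc.2.1 ++ [comment], acc.2.2)
    else if pvUA comment = "NONE" ∨ pvUA comment = "FIRST_TIMER" ∨ pvUA comment = "FIRST_TIMER_CONTRIBUTOR" then
      (acc.1, acc.2.1, acc.2.2 ++ [comment])
    else acc) ([], [], [])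
  (st.1, st.2.1, st.2.2)

-- ===== PORT B =====
def pvInGroup (group : List String) (comment : List (String × String)) : Bool :=
  group.contains (pvUA comment)

def divide_comments_by_user_group_py_alt (comments : List (List (String × String))) : (List (List (String × String))) × (List (List (String × String))) × (List (List (String × String))) :=
  (comments.filter (pvInGroup ["MEMBER", "OWNER"]),
   comments.filter (pvInGroup ["CONTRIBUTOR", "COLLABORATOR"]),
   comments.filter (pvInGroup ["NONE", "FIRST_TIMER", "FIRST_TIMER_CONTRIBUTOR"]))

-- ===== PRECONDITION & SPEC =====
-- Pre_ excludes exactly the inputs where some comment lacks the "user_association" key, on which the Python A (and B) raise KeyError.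
def Pre_divide_comments_by_user_group_py (comments : List (List (String × String))) : Prop :=
  (comments.all (fun c => (PySem.Dict.ofList c).contains "user_association")) = true
instance (comments : List (List (String × String))) : Decidable (Pre_divide_comments_by_user_group_py comments) := by unfold Pre_divide_comments_by_user_group_py; infer_instance

def pvWitness_divide_comments_by_user_group_py : (List (List (String × String))) :=
  [[("user_association", "MEMBER"), ("body", "hi")], [("user_association", "NONE")]]

def Spec_divide_comments_by_user_group_py (comments : List (List (String × String))) (out : (List (List (String × String))) × (List (List (String × String))) × (List (List (String × String)))) : Prop := out = divide_comments_by_user_group_py_alt comments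
instance (comments : List (List (String × String))) (out : (List (List (String × String))) × (List (List (String × String))) × (List (List (String × String)))) : Decidable (Spec_divide_comments_by_user_group_py comments out) := by unfold Spec_divide_comments_by_user_group_py; infer_instance

-- ===== CLAIM (what is proved, stated in full; the proofs are below) =====
def Claim_equal_divide_comments_by_user_group_py : Prop := ∀ (comments : List (List (String × String))), Dom_divide_comments_by_user_group_py comments → Pre_divide_comments_by_user_group_py comments → Spec_divide_comments_by_user_group_py comments (divide_comments_by_user_group_py comments)

-- ===== LEMMAS AND PROOFS =====

theorem pv_loop_eq (l : List (List (String × String)))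
    (a b c : List (List (String × String))) :
    l.foldl (fun (acc : (List (List (String × String))) × (List (List (String × String))) × (List (List (String × String)))) comment =>
      if pvUA comment = "MEMBER" ∨ pvUA comment = "OWNER" then
        (acc.1 ++ [comment], acc.2.1, acc.2.2)
      else if pvUA comment = "CONTRIBUTOR" ∨ pvUA comment = "COLLABORATOR" then
        (acc.1, acc.2.1 ++ [comment], acc.2.2)
      else if pvUA comment = "NONE" ∨ pvUA comment = "FIRST_TIMER" ∨ pvUA comment = "FIRST_TIMER_CONTRIBUTOR" then
        (acc.1, acc.2.1, acc.2.2 ++ [comment])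
      else acc) (a, b, c)
    = (a ++ l.filter (pvInGroup ["MEMBER", "OWNER"]),
       b ++ l.filter (pvInGroup ["CONTRIBUTOR", "COLLABORATOR"]),
       c ++ l.filter (pvInGroup ["NONE", "FIRST_TIMER", "FIRST_TIMER_CONTRIBUTOR"])) := by
  induction l generalizing a b c with
  | nil => simp
  | cons x xs ih =>
    simp only [List.foldl_cons]
    split_ifs with h1 h2 h3
    · rcases h1 with h | h <;>
        simp [pvInGroup, h, ih, List.append_assoc]
    · rcases h2 with h | h <;>
        simp [pvInGroup, h, ih, List.append_assoc]
    · rcases h3 with h | h | h <;>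
        simp [pvInGroup, h, ih, List.append_assoc]
    · push_neg at h1 h2 h3
      simp [pvInGroup, h1.1, h1.2, h2.1, h2.2, h3.1, h3.2.1, h3.2.2, ih]

-- ===== VERDICT (by name: the statement is the Claim_ definition above) =====
theorem divide_comments_by_user_group_py_spec : Claim_equal_divide_comments_by_user_group_py := by
  intro comments _ _
  show _ = _
  simp [divide_comments_by_user_group_py, divide_comments_by_user_group_py_alt, pv_loop_eq]
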